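-- pv_equiv track=rewrite | github.com/Rick0317/VQE_Bliss_Compactification | Screenings/flip_based_screening.py | extract_flips
-- ===== SOURCE A (Python) =====
-- def extract_flips(terms: tuple):
--     """
--     Given a tuple of Pauli operators, return the sets of flips
--     :param terms:
--     :return:
--     """
--     flip_set = set()
--     flip_y_set = set()
--     flip_x_set = set()
--
--     for term in terms:
--         if term[1] == 'Y':
--             flip_set.add(term[0])
--             flip_y_set.add(term[0])
--         elif term[1] == 'X':
--             flip_set.add(term[0])
--             flip_x_set.add(term[0])
--
--     return flip_set, flip_y_set, flip_x_set
-- ===== SOURCE B (Python) =====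
-- def extract_flips(terms: tuple):
--     """
--     Given a tuple of Pauli operators, return the sets of flips
--     """
--     flip_set = {t[0] for t in terms if t[1] == 'Y' or t[1] == 'X'}
--     flip_y_set = {t[0] for t in terms if t[1] == 'Y'}
--     flip_x_set = {t[0] for t in terms if t[1] == 'X'}
--     return flip_set, flip_y_set, flip_x_set
-- ===== Notes on version B (the rewrite author's own statement) =====
-- stated objective: simpler
-- what changed: Replaces the single branched loop that mutates three shared set accumulators with three independent set comprehensions (filter-then-project), so no state is maintained across the traversal and flip_set is derived from its own filtered scan.
import Mathlib
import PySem

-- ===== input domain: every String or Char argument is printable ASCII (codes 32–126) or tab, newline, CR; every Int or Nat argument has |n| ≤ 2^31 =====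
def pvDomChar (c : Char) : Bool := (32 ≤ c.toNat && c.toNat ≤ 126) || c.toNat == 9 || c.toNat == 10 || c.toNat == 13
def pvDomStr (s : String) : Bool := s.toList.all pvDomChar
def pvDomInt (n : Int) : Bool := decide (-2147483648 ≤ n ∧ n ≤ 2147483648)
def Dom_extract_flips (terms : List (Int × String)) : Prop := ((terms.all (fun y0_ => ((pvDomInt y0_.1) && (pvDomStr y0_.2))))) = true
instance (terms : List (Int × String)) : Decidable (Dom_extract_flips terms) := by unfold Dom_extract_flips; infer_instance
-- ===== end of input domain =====

-- B replaces A's single branched loop over three shared set accumulators with three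
-- independent filter-then-project set comprehensions (objective: simpler).

-- ===== PORT A =====
-- one pass; state = (flip_set, flip_y_set, flip_x_set), branched adds as in A
def extract_flips (terms : List (Int × String)) : List Int × List Int × List Int :=
  let st := terms.foldl (fun (st : List Int × List Int × List Int) term =>
    if term.2 == "Y" then
      (PySem.Set.add st.1 term.1, PySem.Set.add st.2.1 term.1, st.2.2)
    else if term.2 == "X" then
      (PySem.Set.add st.1 term.1, st.2.1, PySem.Set.add st.2.2 term.1)
    else st) ([], [], [])
  st

-- ===== PORT B =====
-- three independent set comprehensions: {t[0] for t in terms if <cond>}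
def extract_flips_alt (terms : List (Int × String)) : List Int × List Int × List Int :=
  (PySem.Set.ofList ((terms.filter (fun t => t.2 == "Y" || t.2 == "X")).map Prod.fst),
   PySem.Set.ofList ((terms.filter (fun t => t.2 == "Y")).map Prod.fst),
   PySem.Set.ofList ((terms.filter (fun t => t.2 == "X")).map Prod.fst))

-- ===== PRECONDITION & SPEC =====
def Spec_extract_flips (terms : List (Int × String)) (out : List Int × List Int × List Int) : Prop := out = extract_flips_alt terms
instance (terms : List (Int × String)) (out : List Int × List Int × List Int) : Decidable (Spec_extract_flips terms out) := by unfold Spec_extract_flips; infer_instance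

-- ===== CLAIM (what is proved, stated in full; the proofs are below) =====
def Claim_equal_extract_flips : Prop := ∀ (terms : List (Int × String)), Dom_extract_flips terms → Spec_extract_flips terms (extract_flips terms)

-- ===== LEMMAS AND PROOFS =====

-- loop invariant: A's fold from any accumulators folds Set.add over the filtered projections
theorem extract_flips_fold_eq (terms : List (Int × String))
    (s ys xs : List Int) :
    terms.foldl (fun (st : List Int × List Int × List Int) term =>
      if term.2 == "Y" then
        (PySem.Set.add st.1 term.1, PySem.Set.add st.2.1 term.1, st.2.2)
      else if term.2 == "X" then
        (PySem.Set.add st.1 term.1, st.2.1, PySem.Set.add st.2.2 term.1)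
      else st) (s, ys, xs)
    = (((terms.filter (fun t => t.2 == "Y" || t.2 == "X")).map Prod.fst).foldl PySem.Set.add s,
       ((terms.filter (fun t => t.2 == "Y")).map Prod.fst).foldl PySem.Set.add ys,
       ((terms.filter (fun t => t.2 == "X")).map Prod.fst).foldl PySem.Set.add xs) := by
  induction terms generalizing s ys xs with
  | nil => rfl
  | cons t rest ih =>
    by_cases hY : (t.2 == "Y") = true
    · have hX : (t.2 == "X") = false := by
        rw [show t.2 = "Y" from by simpa using hY]; decide
      simp only [List.foldl_cons, List.filter_cons, hY, hX, Bool.true_or, if_true,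
        Bool.false_eq_true, if_false, List.map_cons, ih]
    · rw [Bool.not_eq_true] at hY
      by_cases hX : (t.2 == "X") = true
      · simp only [List.foldl_cons, List.filter_cons, hY, hX, Bool.false_or,
          if_true, Bool.false_eq_true, if_false, List.map_cons, ih]
      · rw [Bool.not_eq_true] at hX
        simp only [List.foldl_cons, List.filter_cons, hY, hX, Bool.false_or,
          Bool.false_eq_true, if_false, ih]

-- ===== VERDICT (by name: the statement is the Claim_ definition above) =====
theorem extract_flips_spec : Claim_equal_extract_flips := by
  intro terms _
  unfold Spec_extract_flips extract_flips extract_flips_alt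
  rw [extract_flips_fold_eq]
  rfl
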